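-- pv_equiv track=rewrite | github.com/axyut/learning | leetcode/python/cardMovement.py | moveCard
-- ===== SOURCE A (Python) =====
-- def moveCard(grid, startRow, startCol, commands):
--     rows, cols = len(grid), len(grid[0])
--     currentRow, currentCol = startRow, startCol
--
--     for command in commands:
--         if command == "up" and currentRow > 0:
--             currentRow -= 1
--         elif command == "down" and currentRow < rows - 1:
--             currentRow += 1
--         elif command == "left" and currentCol > 0:
--             currentCol -= 1
--         elif command == "right" and currentCol < cols - 1:
--             currentCol += 1
--
--     return currentRow, currentCol
-- ===== SOURCE B (Python) =====
-- def moveCard(grid, startRow, startCol, commands):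
--     rows, cols = len(grid), len(grid[0])
--     vertical = [c for c in commands if c == "up" or c == "down"]
--     horizontal = [c for c in commands if c == "left" or c == "right"]
--     currentRow = startRow
--     for c in vertical:
--         if c == "up":
--             if currentRow > 0:
--                 currentRow -= 1
--         else:
--             if currentRow < rows - 1:
--                 currentRow += 1
--     currentCol = startCol
--     for c in horizontal:
--         if c == "left":
--             if currentCol > 0:
--                 currentCol -= 1
--         else:
--             if currentCol < cols - 1:
--                 currentCol += 1
--     return currentRow, currentCol
-- ===== Notes on version B (the rewrite author's own statement) =====
-- stated objective: alternative
-- what changed: B splits the command stream into its vertical and horizontal subsequences and runs two independent one-axis passes instead of A's single four-way-branch loop over the interleaved stream, exploiting that row and column motion are independent.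
-- outside the precondition, e.g. on moveCard([], 0, 0, ['up']): A raises IndexError, B raises IndexError
import Mathlib
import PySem

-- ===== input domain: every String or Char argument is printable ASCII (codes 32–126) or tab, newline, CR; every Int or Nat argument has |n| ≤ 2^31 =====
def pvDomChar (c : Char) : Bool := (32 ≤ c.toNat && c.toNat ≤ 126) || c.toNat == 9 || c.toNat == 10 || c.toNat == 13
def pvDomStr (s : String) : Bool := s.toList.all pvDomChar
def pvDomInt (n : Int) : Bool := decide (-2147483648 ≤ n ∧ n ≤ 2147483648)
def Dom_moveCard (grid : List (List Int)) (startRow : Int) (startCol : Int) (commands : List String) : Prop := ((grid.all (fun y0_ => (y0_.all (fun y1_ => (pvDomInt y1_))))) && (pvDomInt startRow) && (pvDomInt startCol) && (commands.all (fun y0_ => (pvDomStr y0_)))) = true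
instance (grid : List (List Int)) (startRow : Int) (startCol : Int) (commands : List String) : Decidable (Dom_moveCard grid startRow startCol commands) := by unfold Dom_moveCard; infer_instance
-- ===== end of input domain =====

-- B replaces A's single four-way-branch loop by two independent one-axis passes over the
-- vertical and horizontal command subsequences (alternative decomposition, same cost).


-- ===== PORT A =====
-- A's loop body: one four-way elif chain over the pair state.
def moveCardStep (rows cols : Int) (st : Int × Int) (command : String) : Int × Int :=
  if command = "up" ∧ st.1 > 0 then (st.1 - 1, st.2)
  else if command = "down" ∧ st.1 < rows - 1 then (st.1 + 1, st.2)
  else if command = "left" ∧ st.2 > 0 then (st.1, st.2 - 1)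
  else if command = "right" ∧ st.2 < cols - 1 then (st.1, st.2 + 1)
  else st

def moveCard (grid : List (List Int)) (startRow : Int) (startCol : Int) (commands : List String) : Int × Int :=
  let rows : Int := grid.length
  -- grid[0] raises IndexError on empty grid: Pre_ excludes grid = []
  let cols : Int := (((PySem.List.pyGet? grid 0).getD []).length : Int)
  commands.foldl (moveCardStep rows cols) (startRow, startCol)

-- ===== PORT B =====
def vStep (rows : Int) (r : Int) (c : String) : Int :=
  if c = "up" then (if r > 0 then r - 1 else r)
  else (if r < rows - 1 then r + 1 else r)

def hStep (cols : Int) (col : Int) (c : String) : Int :=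
  if c = "left" then (if col > 0 then col - 1 else col)
  else (if col < cols - 1 then col + 1 else col)

def moveCard_alt (grid : List (List Int)) (startRow : Int) (startCol : Int) (commands : List String) : Int × Int :=
  let rows : Int := grid.length
  let cols : Int := (((PySem.List.pyGet? grid 0).getD []).length : Int)
  let vertical := commands.filter (fun c => c = "up" ∨ c = "down")
  let horizontal := commands.filter (fun c => c = "left" ∨ c = "right")
  (vertical.foldl (vStep rows) startRow, horizontal.foldl (hStep cols) startCol)

-- ===== PRECONDITION & SPEC =====
-- Pre_ excludes the empty grid, on which A's 'len(grid[0])' raises IndexError.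
def Pre_moveCard (grid : List (List Int)) (startRow : Int) (startCol : Int) (commands : List String) : Prop := grid ≠ []
instance (grid : List (List Int)) (startRow : Int) (startCol : Int) (commands : List String) : Decidable (Pre_moveCard grid startRow startCol commands) := by unfold Pre_moveCard; infer_instance
def pvWitness_moveCard : List (List Int) × Int × Int × List String := ([[1, 2], [3, 4]], 0, 0, ["down", "right", "up"])

def Spec_moveCard (grid : List (List Int)) (startRow : Int) (startCol : Int) (commands : List String) (out : Int × Int) : Prop := out = moveCard_alt grid startRow startCol commands
instance (grid : List (List Int)) (startRow : Int) (startCol : Int) (commands : List String) (out : Int × Int) : Decidable (Spec_moveCard grid startRow startCol commands out) := by unfold Spec_moveCard; infer_instance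

-- ===== CLAIM (what is proved, stated in full; the proofs are below) =====
def Claim_equal_moveCard : Prop := ∀ (grid : List (List Int)) (startRow : Int) (startCol : Int) (commands : List String), Dom_moveCard grid startRow startCol commands → Pre_moveCard grid startRow startCol commands → Spec_moveCard grid startRow startCol commands (moveCard grid startRow startCol commands)

-- ===== LEMMAS AND PROOFS =====

-- A's interleaved fold splits exactly into the two one-axis folds.
theorem moveCard_split (rows cols : Int) (commands : List String) :
    ∀ (r c : Int),
      commands.foldl (moveCardStep rows cols) (r, c) =
        ((commands.filter (fun s => s = "up" ∨ s = "down")).foldl (vStep rows) r,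
         (commands.filter (fun s => s = "left" ∨ s = "right")).foldl (hStep cols) c) := by
  induction commands with
  | nil => intro r c; simp
  | cons cmd rest ih =>
    intro r c
    by_cases hu : cmd = "up"
    · subst hu
      simp only [List.foldl, List.filter, moveCardStep, vStep]
      simp only [ih]
      split_ifs with h <;> simp_all [vStep, hStep] <;> rw [if_neg (by omega)]
    · by_cases hd : cmd = "down"
      · subst hd
        simp only [List.foldl, List.filter, moveCardStep, vStep]
        simp only [ih]
        split_ifs with h <;> simp_all [vStep, hStep] <;> rw [if_neg (by omega)]
      · by_cases hl : cmd = "left"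
        · subst hl
          simp only [List.foldl, List.filter, moveCardStep, hStep]
          simp only [ih]
          split_ifs with h <;> simp_all [vStep, hStep] <;> rw [if_neg (by omega)]
        · by_cases hr : cmd = "right"
          · subst hr
            simp only [List.foldl, List.filter, moveCardStep, hStep]
            simp only [ih]
            split_ifs with h <;> simp_all [vStep, hStep] <;> rw [if_neg (by omega)]
          · simp [List.foldl, List.filter, moveCardStep, hu, hd, hl, hr, ih]

-- ===== VERDICT (by name: the statement is the Claim_ definition above) =====
theorem moveCard_spec : Claim_equal_moveCard := by
  intro grid startRow startCol commands _ _
  unfold Spec_moveCard moveCard moveCard_alt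
  exact moveCard_split _ _ commands startRow startCol
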